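-- pv_equiv track=rewrite | github.com/cafrii/omega2 | 백준/Gold/1043. 거짓말/1043.py | solve
-- ===== SOURCE A (Python) =====
-- def solve(N:int, tt:list[int], parties:list[list[int]])->int:
--     '''
--         tt: 진실을 아는 사람 목록
--     '''
--     # log("tt %s", tt)
--     roots = list(range(N+1))
--
--     def find_root(a:int)->int:
--         # 요소 a 가 속한 집합의 대표값을 리턴
--         if a == roots[a]: return a
--         roots[a] = find_root(roots[a])
--         return roots[a]
--
--     # 번호 0은 사용되지 않으므로, 진실 그룹의 초기 대표자로 지정.
--     ra = 0
--     for b in tt: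
--         rb = find_root(b)
--         if ra == rb: continue
--         roots[rb] = roots[b] = ra
--
--     # log("#..: %s", roots)
--
--     for guests in parties:
--         # 파티에 참석한 게스트들은 모두 한 그룹에 소속되게 됨.
--         if len(guests) <= 1: continue
--         a,ra = guests[0],find_root(guests[0])
--         for b in guests[1:]:
--             rb = find_root(b)
--             if ra == rb: continue
--             if rb == 0: roots[ra] = roots[a] = 0
--             else: roots[rb] = roots[b] = ra
--
--     return [ find_root(g[0])>0 for g in parties ].count(True)
-- ===== SOURCE B (Python) =====
-- def solve(N:int, tt:list[int], parties:list[list[int]])->int: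
--     # Quick-find (flat label array) instead of union-find forest with path compression:
--     # label[i] is directly the current class label of person i; a merge rewrites the
--     # whole array once; person 0 anchors the truth-knowers' class.
--     label = list(range(N + 1))
--
--     def union(a: int, b: int):
--         nonlocal label
--         la, lb = label[a], label[b]
--         if la != lb:
--             label = [la if x == lb else x for x in label]
--
--     for t in tt:
--         union(0, t)
--     for guests in parties:
--         first = guests[0]
--         for g in guests[1:]:
--             union(first, g)
--     return sum(1 for g in parties if label[g[0]] != label[0])
-- ===== Notes on version B (the rewrite author's own statement) =====
-- stated objective: simpler
-- what changed: Replaces the union-find forest (recursive find with path compression, root-pointer surgery, and a special 0-absorption branch) by a flat quick-find labelling: label[i] IS the class label, a merge rewrites the array once, and the answer compares label[g[0]] with label[0], with no recursion and no special cases.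
import Mathlib
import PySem

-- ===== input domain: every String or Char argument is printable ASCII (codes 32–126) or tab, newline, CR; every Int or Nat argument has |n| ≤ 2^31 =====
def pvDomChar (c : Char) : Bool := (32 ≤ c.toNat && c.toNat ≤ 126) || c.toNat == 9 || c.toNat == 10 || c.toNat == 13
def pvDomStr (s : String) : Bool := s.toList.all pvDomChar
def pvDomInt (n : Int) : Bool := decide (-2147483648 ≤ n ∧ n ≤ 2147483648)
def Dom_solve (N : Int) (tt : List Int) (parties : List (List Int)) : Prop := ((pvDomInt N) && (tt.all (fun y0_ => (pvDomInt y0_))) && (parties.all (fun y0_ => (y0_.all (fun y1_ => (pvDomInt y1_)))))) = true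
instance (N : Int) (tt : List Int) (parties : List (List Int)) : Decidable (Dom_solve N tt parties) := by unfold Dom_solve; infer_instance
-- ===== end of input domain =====

-- B replaces A's union-find forest (recursive find with path compression) by a flat
-- quick-find labelling: simpler (no recursion, no root surgery), same results.

-- Python list index (exact for -len ≤ a < len; Python raises IndexError outside that
-- range, and such inputs are outside Pre_solve).
def pyslot (len : Nat) (a : Int) : Nat := (if a < 0 then a + len else a).toNat

-- ===== PORT A =====
-- transliteration of A's recursive find_root with path compression; fuel = length+1
-- suffices on every Pre_ input (pointer chains are acyclic, length ≤ list length).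
def findRoot : Nat → List Int → Int → List Int × Int
  | 0, roots, _ => (roots, 0)
  | fuel+1, roots, a =>
    let ra := roots.getD (pyslot roots.length a) 0
    if a = ra then (roots, a)
    else
      let p := findRoot fuel roots ra
      let roots1 := p.1.set (pyslot p.1.length a) p.2
      (roots1, roots1.getD (pyslot roots1.length a) 0)

def solve (N : Int) (tt : List Int) (parties : List (List Int)) : Int :=
  let roots0 : List Int := (List.range (N+1).toNat).map Int.ofNat
  let roots1 := tt.foldl (fun roots b =>
    let p := findRoot (roots.length + 1) roots b
    if (0 : Int) = p.2 then p.1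
    else ((p.1.set (pyslot p.1.length p.2) 0).set (pyslot p.1.length b) 0)) roots0
  let roots2 := parties.foldl (fun roots guests =>
    if guests.length ≤ 1 then roots
    else
      let a := guests.getD 0 0
      let p := findRoot (roots.length + 1) roots a
      let ra := p.2
      (guests.drop 1).foldl (fun roots b =>
        let q := findRoot (roots.length + 1) roots b
        let rb := q.2
        if ra = rb then q.1
        else if rb = 0 then ((q.1.set (pyslot q.1.length ra) 0).set (pyslot q.1.length a) 0)
        else ((q.1.set (pyslot q.1.length rb) ra).set (pyslot q.1.length b) ra)) p.1) roots1
  let final := parties.foldl (fun (st : List Int × List Bool) g =>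
    let p := findRoot (st.1.length + 1) st.1 (g.getD 0 0)
    (p.1, st.2 ++ [decide (p.2 > 0)])) (roots2, ([] : List Bool))
  (final.2.count true : Int)

-- ===== PORT B =====
def unionB (label : List Int) (a b : Int) : List Int :=
  let la := label.getD (pyslot label.length a) 0
  let lb := label.getD (pyslot label.length b) 0
  if la = lb then label
  else label.map (fun x => if x = lb then la else x)

def solve_alt (N : Int) (tt : List Int) (parties : List (List Int)) : Int :=
  let label0 : List Int := (List.range (N+1).toNat).map Int.ofNat
  let label1 := tt.foldl (fun lab t => unionB lab 0 t) label0
  let label2 := parties.foldl (fun lab g =>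
    (g.drop 1).foldl (fun lab b => unionB lab (g.getD 0 0) b) lab) label1
  parties.foldl (fun (c : Int) g =>
    if label2.getD (pyslot label2.length (g.getD 0 0)) 0 = label2.getD (pyslot label2.length 0) 0
    then c else c + 1) 0

-- ===== PRECONDITION & SPEC =====
-- Pre_solve is exactly where A returns: A raises IndexError on an empty party and
-- on any person number beyond N or below -(N+1) (negative numbers down to -(N+1)
-- are read via Python's negative-index wraparound and return normally).
def Pre_solve (N : Int) (tt : List Int) (parties : List (List Int)) : Prop :=
  (∀ t ∈ tt, -(N+1) ≤ t ∧ t ≤ N) ∧ (∀ g ∈ parties, g ≠ [] ∧ ∀ m ∈ g, -(N+1) ≤ m ∧ m ≤ N)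
instance (N : Int) (tt : List Int) (parties : List (List Int)) : Decidable (Pre_solve N tt parties) := by unfold Pre_solve; infer_instance

def pvWitness_solve : Int × List Int × List (List Int) := (3, [2], [[1,2],[3]])

def Spec_solve (N : Int) (tt : List Int) (parties : List (List Int)) (out : Int) : Prop := out = solve_alt N tt parties
instance (N : Int) (tt : List Int) (parties : List (List Int)) (out : Int) : Decidable (Spec_solve N tt parties out) := by unfold Spec_solve; infer_instance

-- ===== CLAIM (what is proved, stated in full; the proofs are below) =====
def Claim_equal_solve : Prop := ∀ (N : Int) (tt : List Int) (parties : List (List Int)), Dom_solve N tt parties → Pre_solve N tt parties → Spec_solve N tt parties (solve N tt parties)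

-- ===== LEMMAS AND PROOFS =====

-- pointer-chain abstraction of A's roots array
def pstep (roots : List Int) (a : Int) : Int := roots.getD (pyslot roots.length a) 0
def piter (roots : List Int) : Nat → Int → Int
  | 0, a => a
  | k+1, a => piter roots k (pstep roots a)
def IsFix (roots : List Int) (r : Int) : Prop := pstep roots r = r
def Valid (roots : List Int) (a : Int) : Prop := 0 ≤ a ∧ a < (roots.length : Int)
def rootOf (roots : List Int) (a : Int) : Int := piter roots roots.length a
def GoodA (roots : List Int) : Prop :=
  (∀ a, Valid roots a → Valid roots (pstep roots a)) ∧
  pstep roots 0 = 0 ∧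
  (∀ a, Valid roots a → ∃ k, IsFix roots (piter roots k a))
-- simulation relation between A's forest and B's flat labelling
def RelAB (roots label : List Int) : Prop :=
  label.length = roots.length ∧
  (∀ a, Valid roots a → label.getD a.toNat 0 = label.getD (rootOf roots a).toNat 0) ∧
  (∀ r r', Valid roots r → Valid roots r' → IsFix roots r → IsFix roots r' →
    label.getD r.toNat 0 = label.getD r'.toNat 0 → r = r')

theorem pyslot_nonneg (len : Nat) (a : Int) (h : 0 ≤ a) : pyslot len a = a.toNat := by
  unfold pyslot; rw [if_neg (by omega)]

theorem pstep_nonneg (roots : List Int) (a : Int) (h : 0 ≤ a) :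
    pstep roots a = roots.getD a.toNat 0 := by
  unfold pstep; rw [pyslot_nonneg _ _ h]

theorem piter_succ (roots : List Int) (k : Nat) (a : Int) :
    piter roots (k+1) a = piter roots k (pstep roots a) := rfl

theorem piter_add (roots : List Int) (s t : Nat) (a : Int) :
    piter roots (s + t) a = piter roots s (piter roots t a) := by
  induction t generalizing a with
  | zero => rfl
  | succ t ih => rw [show s + (t+1) = (s + t) + 1 by omega, piter_succ, piter_succ, ih]

theorem piter_succ' (roots : List Int) (k : Nat) (a : Int) :
    piter roots (k+1) a = pstep roots (piter roots k a) := by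
  rw [show k + 1 = 1 + k by omega, piter_add]; rfl

theorem piter_of_fix (roots : List Int) (r : Int) (h : IsFix roots r) (k : Nat) :
    piter roots k r = r := by
  induction k with
  | zero => rfl
  | succ k ih => rw [piter_succ, h, ih]

theorem fix_piter_mono (roots : List Int) (a : Int) (k m : Nat)
    (h : IsFix roots (piter roots k a)) (hkm : k ≤ m) :
    piter roots m a = piter roots k a := by
  rw [show m = (m - k) + k by omega, piter_add, piter_of_fix _ _ h]

theorem valid_piter (roots : List Int) (hG : GoodA roots) (a : Int) (ha : Valid roots a)
    (k : Nat) : Valid roots (piter roots k a) := by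
  induction k generalizing a with
  | zero => exact ha
  | succ k ih => rw [piter_succ]; exact ih _ (hG.1 _ ha)


theorem piter_period (roots : List Int) (a : Int) (i p : Nat)
    (h : piter roots (i + p) a = piter roots i a) (m : Nat) (hm : i ≤ m) :
    piter roots (m + p) a = piter roots m a := by
  have : m + p = (m - i) + (p + i) := by omega
  rw [this, piter_add, show p + i = i + p from by omega, h, ← piter_add,
    show m - i + i = m from by omega]

-- from a cycle below n and any terminating index, the chain is fixed by step n
theorem fix_reduce (roots : List Int) (a : Int) (n : Nat) (i j : Nat) (hij : (i:Nat) < j)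
    (hjn : j ≤ n) (hf : piter roots i a = piter roots j a) :
    ∀ k, IsFix roots (piter roots k a) → IsFix roots (piter roots n a) := by
  intro k
  induction k using Nat.strong_induction_on with
  | _ k ih =>
    intro hk
    by_cases hkn : k ≤ n
    · rw [fix_piter_mono roots a k n hk hkn]
      exact hk
    · set p := j - i with hp
      have hper : piter roots ((k - p) + p) a = piter roots (k - p) a := by
        apply piter_period roots a i p
        · rw [show i + p = j from by omega]; exact hf.symm
        · omega
      have : piter roots k a = piter roots (k - p) a := by
        rw [← hper, show k - p + p = k from by omega]
      rw [this] at hk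
      exact ih (k - p) (by omega) hk


theorem fix_within (roots : List Int) (hG : GoodA roots) (a : Int) (ha : Valid roots a) :
    IsFix roots (piter roots roots.length a) := by
  obtain ⟨k, hk⟩ := hG.2.2 a ha
  set n := roots.length with hn
  have hn1 : 1 ≤ n := by
    rcases ha with ⟨h1, h2⟩; omega
  -- pigeonhole: two indices in [0..n] with equal iterates
  have hpig : ∃ i j : Fin (n+1), i ≠ j ∧ piter roots i a = piter roots j a := by
    have hcard : Fintype.card (Fin n) < Fintype.card (Fin (n+1)) := by simp
    obtain ⟨i, j, hij, hf⟩ := Fintype.exists_ne_map_eq_of_card_lt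
      (fun j : Fin (n+1) => (⟨(piter roots j a).toNat, by
        have := valid_piter roots hG a ha j
        rcases this with ⟨h1, h2⟩; omega⟩ : Fin n)) hcard
    refine ⟨i, j, hij, ?_⟩
    have h1 := (valid_piter roots hG a ha i).1
    have h2 := (valid_piter roots hG a ha j).1
    have := congrArg (fun x : Fin n => (x : Nat)) hf
    simp at this
    omega
  obtain ⟨i, j, hij, hf⟩ := hpig
  -- wlog i < j
  rcases lt_or_gt_of_ne (fun h => hij (Fin.ext h) : (i:Nat) ≠ (j:Nat)) with hlt | hlt
  case _ =>
    exact fix_reduce roots a n i j hlt (by omega) hf k hk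
  case _ =>
    exact fix_reduce roots a n j i hlt (by omega) hf.symm k hk

theorem rootOf_isFix (roots : List Int) (hG : GoodA roots) (a : Int) (ha : Valid roots a) :
    IsFix roots (rootOf roots a) := fix_within roots hG a ha

theorem rootOf_eq_of_fix (roots : List Int) (hG : GoodA roots) (a : Int) (ha : Valid roots a)
    (k : Nat) (h : IsFix roots (piter roots k a)) : rootOf roots a = piter roots k a := by
  by_cases hk : k ≤ roots.length
  · exact fix_piter_mono roots a k roots.length h hk
  · have hfix := rootOf_isFix roots hG a ha
    unfold rootOf at *
    rw [fix_piter_mono roots a roots.length k hfix (by omega)]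

theorem rootOf_valid (roots : List Int) (hG : GoodA roots) (a : Int) (ha : Valid roots a) :
    Valid roots (rootOf roots a) := valid_piter roots hG a ha _

theorem rootOf_of_isFix (roots : List Int) (r : Int) (h : IsFix roots r) :
    rootOf roots r = r := piter_of_fix roots r h _

theorem rootOf_pstep (roots : List Int) (hG : GoodA roots) (a : Int) (ha : Valid roots a) :
    rootOf roots (pstep roots a) = rootOf roots a := by
  have h1 : rootOf roots (pstep roots a) = piter roots (roots.length + 1) a := by
    unfold rootOf
    rw [show roots.length + 1 = roots.length + 1 from rfl, piter_add roots roots.length 1 a]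
    rfl
  rw [h1]
  exact (rootOf_eq_of_fix roots hG a ha (roots.length + 1)
    (by rw [piter_succ']; have := rootOf_isFix roots hG a ha; unfold rootOf at this
        rw [this]; exact this)).symm

theorem rootOf_piter (roots : List Int) (hG : GoodA roots) (a : Int) (ha : Valid roots a)
    (k : Nat) : rootOf roots (piter roots k a) = rootOf roots a := by
  induction k generalizing a with
  | zero => rfl
  | succ k ih => rw [piter_succ, ih _ (hG.1 _ ha), rootOf_pstep roots hG a ha]

theorem rootOf_zero (roots : List Int) (hG : GoodA roots) : rootOf roots 0 = 0 :=
  rootOf_of_isFix roots 0 hG.2.1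

-- Python's negative-index wraparound: person a < 0 denotes slot a + len
def normI (len : Nat) (a : Int) : Int := if a < 0 then a + len else a

theorem pyslot_normI (len : Nat) (a : Int) : pyslot len a = (normI len a).toNat := by
  unfold pyslot normI
  split <;> rfl

theorem normI_valid (roots : List Int) (a : Int)
    (h1 : -(roots.length : Int) ≤ a) (h2 : a < (roots.length : Int)) :
    Valid roots (normI roots.length a) := by
  unfold Valid normI
  split <;> omega

theorem normI_of_nonneg (len : Nat) (a : Int) (h : 0 ≤ a) : normI len a = a := by
  unfold normI
  rw [if_neg (by omega)]

theorem normI_idem (len : Nat) (a : Int) (h1 : -(len : Int) ≤ a) :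
    normI len (normI len a) = normI len a := by
  unfold normI
  split <;> [skip; rfl]
  rw [if_neg (by omega)]

-- effect of one write roots[b] := t on the chain structure
theorem pstep_set (roots : List Int) (b t x : Int) (hb : Valid roots b) (hx : Valid roots x) :
    pstep (roots.set (pyslot roots.length b) t) x = if x = b then t else pstep roots x := by
  unfold pstep
  rw [List.length_set, pyslot_nonneg _ _ hb.1, pyslot_nonneg _ _ hx.1]
  by_cases h : x = b
  · subst h
    rw [if_pos rfl]
    have hlt : x.toNat < roots.length := by rcases hx with ⟨h1, h2⟩; omega
    simp [List.getD_eq_getElem?_getD, hlt]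
  · rw [if_neg h]
    have hne : x.toNat ≠ b.toNat := by
      rcases hx with ⟨h1, _⟩; rcases hb with ⟨h2, _⟩; omega
    simp [List.getD_eq_getElem?_getD, List.getElem?_set_ne (Ne.symm hne)]

theorem valid_set (roots : List Int) (i : Nat) (t x : Int) :
    Valid (roots.set i t) x ↔ Valid roots x := by
  unfold Valid; rw [List.length_set]

theorem piter_set_avoid (roots : List Int) (b t : Int) (hG : GoodA roots)
    (hb : Valid roots b) (k : Nat) :
    ∀ x, Valid roots x → (∀ j, piter roots j x ≠ b) →
      piter (roots.set (pyslot roots.length b) t) k x = piter roots k x := by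
  induction k with
  | zero => intro x _ _; rfl
  | succ k ih =>
    intro x hx havoid
    rw [piter_succ, piter_succ, pstep_set roots b t x hb hx, if_neg (show x ≠ b from havoid 0)]
    exact ih _ (hG.1 _ hx) (fun j => by
      have : piter roots j (pstep roots x) = piter roots (j+1) x := (piter_succ _ _ _).symm
      rw [this]; exact havoid (j+1))

theorem set_effect (roots : List Int) (b t : Int)
    (hG : GoodA roots) (hb : Valid roots b) (ht : Valid roots t) (hb0 : b ≠ 0)
    (hbt : ∀ k, piter roots k t ≠ b) :
    GoodA (roots.set (pyslot roots.length b) t) ∧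
    (∀ x, Valid roots x → (∃ k, piter roots k x = b) →
        rootOf (roots.set (pyslot roots.length b) t) x = rootOf roots t) ∧
    (∀ x, Valid roots x → (∀ k, piter roots k x ≠ b) →
        rootOf (roots.set (pyslot roots.length b) t) x = rootOf roots x) ∧
    (∀ r, Valid roots r → (IsFix (roots.set (pyslot roots.length b) t) r ↔ IsFix roots r ∧ r ≠ b)) := by
  set R' := roots.set (pyslot roots.length b) t with hR'
  have hlen : R'.length = roots.length := List.length_set ..
  have hVal : ∀ x, Valid R' x ↔ Valid roots x := fun x => valid_set ..
  have hstep : ∀ x, Valid roots x → pstep R' x = if x = b then t else pstep roots x :=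
    fun x hx => pstep_set roots b t x hb hx
  have htb : t ≠ b := hbt 0
  have htchain : ∀ k, piter R' k t = piter roots k t :=
    fun k => piter_set_avoid roots b t hG hb k t ht hbt
  have hfixset : ∀ r, Valid roots r → (IsFix R' r ↔ IsFix roots r ∧ r ≠ b) := by
    intro r hr
    by_cases h : r = b
    · subst h
      constructor
      · intro hf
        exfalso
        have := hstep r hr
        rw [if_pos rfl] at this
        exact htb (this ▸ hf)
      · rintro ⟨_, h⟩; exact absurd rfl h
    · unfold IsFix
      rw [hstep r hr, if_neg h]
      tauto
  have hG' : GoodA R' := by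
    refine ⟨?_, ?_, ?_⟩
    · intro x hx
      rw [hVal] at hx
      rw [hVal, hstep x hx]
      split
      · exact ht
      · exact hG.1 x hx
    · have h0 : Valid roots 0 := ⟨le_refl 0, by rcases hb with ⟨h1, h2⟩; omega⟩
      rw [hstep 0 h0, if_neg (fun h => hb0 h.symm)]
      exact hG.2.1
    · -- termination
      have hTt : ∃ k, IsFix R' (piter R' k t) := by
        obtain ⟨K, hK⟩ := hG.2.2 t ht
        refine ⟨K, ?_⟩
        rw [htchain K]
        rw [(hfixset _ (valid_piter roots hG t ht K))]
        exact ⟨hK, hbt K⟩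
      have main : ∀ K x, Valid roots x → IsFix roots (piter roots K x) →
          ∃ k, IsFix R' (piter R' k x) := by
        intro K
        induction K using Nat.strong_induction_on with
        | _ K ih =>
          intro x hx hKfix
          by_cases hxb : x = b
          · subst hxb
            obtain ⟨k, hk⟩ := hTt
            refine ⟨k + 1, ?_⟩
            rw [piter_succ, hstep x hx, if_pos rfl]
            exact hk
          · by_cases hxf : IsFix roots x
            · refine ⟨0, ?_⟩
              show IsFix R' x
              rw [(hfixset x hx)]
              exact ⟨hxf, hxb⟩
            · have hK0 : K ≠ 0 := by
                intro h; subst h; exact hxf hKfix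
              have hstep' : IsFix roots (piter roots (K-1) (pstep roots x)) := by
                have : piter roots K x = piter roots (K-1) (pstep roots x) := by
                  rw [← piter_succ, show K - 1 + 1 = K from by omega]
                rw [← this]; exact hKfix
              obtain ⟨k, hk⟩ := ih (K-1) (by omega) (pstep roots x) (hG.1 x hx) hstep'
              refine ⟨k + 1, ?_⟩
              rw [piter_succ, hstep x hx, if_neg hxb]
              exact hk
      intro x hx
      rw [hVal] at hx
      obtain ⟨K, hK⟩ := hG.2.2 x hx
      exact main K x hx hK
  refine ⟨hG', ?_, ?_, hfixset⟩
  · -- hit case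
    intro x hx ⟨k₀', hk₀'⟩
    have hex : ∃ k, piter roots k x = b := ⟨k₀', hk₀'⟩
    set k₀ := Nat.find hex with hdefk
    have hk₀ : piter roots k₀ x = b := Nat.find_spec hex
    have hminlt : ∀ j < k₀, piter roots j x ≠ b := fun j hj => Nat.find_min hex hj
    have hagree : ∀ j, j ≤ k₀ → piter R' j x = piter roots j x := by
      intro j hj
      induction j with
      | zero => rfl
      | succ j ihj =>
        rw [piter_succ' R', piter_succ', ihj (by omega),
          hstep _ (valid_piter roots hG x hx j), if_neg (hminlt j (by omega))]
    have hhit : piter R' (k₀+1) x = t := by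
      rw [piter_succ' R', hagree k₀ (le_refl _), hk₀, hstep b hb, if_pos rfl]
    have hVx : Valid R' x := (hVal x).2 hx
    calc rootOf R' x = rootOf R' (piter R' (k₀+1) x) :=
          (rootOf_piter R' hG' x hVx (k₀+1)).symm
      _ = rootOf R' t := by rw [hhit]
      _ = rootOf roots t := by unfold rootOf; rw [hlen, htchain]
  · -- avoid case
    intro x hx havoid
    unfold rootOf
    rw [hlen]
    exact piter_set_avoid roots b t hG hb roots.length x hx havoid

-- merge write: b is a root s being attached under t's class
theorem w_merge (roots : List Int) (s t : Int)
    (hG : GoodA roots) (hs : Valid roots s) (ht : Valid roots t)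
    (hFs : IsFix roots s) (hs0 : s ≠ 0) (hts : rootOf roots t ≠ s) :
    GoodA (roots.set (pyslot roots.length s) t) ∧
    (∀ x, Valid roots x → rootOf (roots.set (pyslot roots.length s) t) x =
        if rootOf roots x = s then rootOf roots t else rootOf roots x) ∧
    (∀ r, Valid roots r → (IsFix (roots.set (pyslot roots.length s) t) r ↔ IsFix roots r ∧ r ≠ s)) := by
  have hs0' : s ≠ 0 := hs0
  have hbt : ∀ k, piter roots k t ≠ s := by
    intro k hk
    exact hts (by
      rw [rootOf_eq_of_fix roots hG t ht k (by rw [hk]; exact hFs)]; exact hk)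
  obtain ⟨hG', hhit, havoid, hfix⟩ := set_effect roots s t hG hs ht hs0 hbt
  refine ⟨hG', ?_, hfix⟩
  intro x hx
  by_cases h : rootOf roots x = s
  · rw [if_pos h]
    exact hhit x hx ⟨roots.length, h⟩
  · rw [if_neg h]
    refine havoid x hx (fun k hk => h ?_)
    rw [rootOf_eq_of_fix roots hG x hx k (by rw [hk]; exact hFs)]
    exact hk

-- compression-type write: b is repointed inside its own class
theorem w_compress (roots : List Int) (b t : Int)
    (hG : GoodA roots) (hb : Valid roots b) (ht : Valid roots t) (hb0 : b ≠ 0)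
    (hroot : rootOf roots b = rootOf roots t) (hbt : ∀ k, piter roots k t ≠ b) :
    GoodA (roots.set (pyslot roots.length b) t) ∧
    (∀ x, Valid roots x → rootOf (roots.set (pyslot roots.length b) t) x = rootOf roots x) ∧
    (∀ r, Valid roots r → (IsFix (roots.set (pyslot roots.length b) t) r ↔ IsFix roots r ∧ r ≠ b)) := by
  obtain ⟨hG', hhit, havoid, hfix⟩ := set_effect roots b t hG hb ht hb0 hbt
  refine ⟨hG', ?_, hfix⟩
  intro x hx
  rcases Classical.em (∃ k, piter roots k x = b) with ⟨k, hk⟩ | hno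
  · rw [hhit x hx ⟨k, hk⟩, ← hroot]
    calc rootOf roots b = rootOf roots (piter roots k x) := by rw [hk]
      _ = rootOf roots x := rootOf_piter roots hG x hx k
  · exact havoid x hx (fun k => fun hk => hno ⟨k, hk⟩)

-- find_root: returns the root, preserves the partition, the fix set, and GoodA
theorem findRoot_spec (K : Nat) : ∀ (fuel : Nat) (roots : List Int) (a : Int),
    GoodA roots → Valid roots a → IsFix roots (piter roots K a) → K < fuel →
    (findRoot fuel roots a).2 = rootOf roots a ∧
    (findRoot fuel roots a).1.length = roots.length ∧
    GoodA (findRoot fuel roots a).1 ∧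
    (∀ x, Valid roots x → rootOf (findRoot fuel roots a).1 x = rootOf roots x) ∧
    (∀ r, Valid roots r → (IsFix (findRoot fuel roots a).1 r ↔ IsFix roots r)) ∧
    (∀ x, Valid roots x → pstep (findRoot fuel roots a).1 x = pstep roots x ∨
        pstep (findRoot fuel roots a).1 x = rootOf roots x) := by
  induction K using Nat.strong_induction_on with
  | _ K ih =>
    intro fuel roots a hG ha hKfix hKf
    obtain ⟨fuel', rfl⟩ : ∃ f, fuel = f + 1 := ⟨fuel - 1, by omega⟩
    have hvl : ∀ (l : List Int) (x : Int), l.length = roots.length → (Valid l x ↔ Valid roots x) := by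
      intro l x h; unfold Valid; rw [h]
    by_cases hfx : a = roots.getD (pyslot roots.length a) 0
    · have hFa : IsFix roots a := by unfold IsFix pstep; exact hfx.symm
      have hred : findRoot (fuel'+1) roots a = (roots, a) := by
        simp only [findRoot, if_pos hfx]
      rw [hred]
      refine ⟨(rootOf_of_isFix roots a hFa).symm, rfl, hG,
        fun x _ => rfl, fun r _ => Iff.rfl, fun x _ => Or.inl rfl⟩
    · have hra : roots.getD (pyslot roots.length a) 0 = pstep roots a := rfl
      have hnFa : ¬ IsFix roots a := fun h => hfx (h.symm)
      have hK0 : K ≠ 0 := by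
        intro h; subst h; exact hnFa hKfix
      have hKfix' : IsFix roots (piter roots (K-1) (pstep roots a)) := by
        have : piter roots K a = piter roots (K-1) (pstep roots a) := by
          rw [← piter_succ, show K - 1 + 1 = K from by omega]
        rw [← this]; exact hKfix
      have hpa : Valid roots (pstep roots a) := hG.1 a ha
      obtain ⟨hp2, hplen, hpG, hproot, hpfix, hpstep⟩ :=
        ih (K-1) (by omega) fuel' roots (pstep roots a) hG hpa hKfix' (by omega)
      set p := findRoot fuel' roots (pstep roots a) with hp
      have hr : p.2 = rootOf roots a := by
        rw [hp2, rootOf_pstep roots hG a ha]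
      have hFr : IsFix roots p.2 := by rw [hr]; exact rootOf_isFix roots hG a ha
      have hra' : p.2 ≠ a := fun h => hnFa (h ▸ hFr)
      have hVa : Valid p.1 a := (hvl p.1 a hplen).2 ha
      have hVr : Valid p.1 p.2 := (hvl p.1 p.2 hplen).2 (hr ▸ rootOf_valid roots hG a ha)
      have ha0 : a ≠ 0 := by
        intro h; subst h; exact hnFa hG.2.1
      have hFr1 : IsFix p.1 p.2 := (hpfix p.2 (hr ▸ rootOf_valid roots hG a ha)).2 hFr
      obtain ⟨hG1, hroot1, hfix1⟩ := w_compress p.1 a p.2 hpG hVa hVr ha0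
        (by
          rw [hproot a ha, hproot p.2 (hr ▸ rootOf_valid roots hG a ha), hr,
            rootOf_of_isFix roots (rootOf roots a) (rootOf_isFix roots hG a ha)])
        (fun k => by rw [piter_of_fix p.1 p.2 hFr1 k]; exact hra')
      have hred : findRoot (fuel'+1) roots a =
          (p.1.set (pyslot p.1.length a) p.2,
           (p.1.set (pyslot p.1.length a) p.2).getD
             (pyslot (p.1.set (pyslot p.1.length a) p.2).length a) 0) := by
        simp only [findRoot, if_neg hfx]
        rfl
      rw [hred]
      have hlen1 : (p.1.set (pyslot p.1.length a) p.2).length = roots.length := by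
        rw [List.length_set, hplen]
      have hstep1 : ∀ x, Valid roots x →
          pstep (p.1.set (pyslot p.1.length a) p.2) x = if x = a then p.2 else pstep p.1 x := by
        intro x hx
        exact pstep_set p.1 a p.2 x hVa ((hvl p.1 x hplen).2 hx)
      refine ⟨?_, hlen1, hG1, ?_, ?_, ?_⟩
      · show pstep (p.1.set (pyslot p.1.length a) p.2) a = rootOf roots a
        rw [hstep1 a ha, if_pos rfl, hr]
      · intro x hx
        rw [hroot1 x ((hvl p.1 x hplen).2 hx), hproot x hx]
      · intro r hrv
        rw [hfix1 r ((hvl p.1 r hplen).2 hrv), hpfix r hrv]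
        constructor
        · exact fun h => h.1
        · intro h
          exact ⟨h, fun he => hnFa (he ▸ h)⟩
      · intro x hx
        rw [hstep1 x hx]
        by_cases hxa : x = a
        · subst hxa
          rw [if_pos rfl, hr]
          exact Or.inr rfl
        · rw [if_neg hxa]
          exact hpstep x hx

theorem set_getD_self (l : List Int) (i : Nat) (hi : i < l.length) :
    l.set i (l.getD i 0) = l := by
  apply List.ext_getElem
  · rw [List.length_set]
  · intro j hj hj'
    rw [List.getElem_set]
    split
    · rename_i h
      subst h
      rw [List.getD_eq_getElem l 0 hi]
    · rfl

-- a call on a negative person behaves exactly like the call on its wrapped slot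
theorem findRoot_norm (roots : List Int) (a : Int) (hG : GoodA roots)
    (h1 : -(roots.length : Int) ≤ a) (h2 : a < (roots.length : Int)) :
    findRoot (roots.length + 1) roots a =
      findRoot (roots.length + 1) roots (normI roots.length a) := by
  by_cases hneg : a < 0
  swap
  · rw [normI_of_nonneg _ _ (by omega)]
  · have hlen1 : 1 ≤ roots.length := by omega
    set na := normI roots.length a with hna
    have hva : Valid roots na := normI_valid roots a h1 h2
    have hslot : pyslot roots.length a = na.toNat := pyslot_normI ..
    have hstepna : roots.getD (pyslot roots.length a) 0 = pstep roots na := by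
      rw [hslot, pstep_nonneg roots na hva.1]
    have hstepna' : roots.getD (pyslot roots.length na) 0 = pstep roots na := by
      rw [pyslot_nonneg _ _ hva.1, pstep_nonneg roots na hva.1]
    have hrage : 0 ≤ pstep roots na := (hG.1 na hva).1
    have hane : ¬ (a = roots.getD (pyslot roots.length a) 0) := by rw [hstepna]; omega
    have hred1 : findRoot (roots.length + 1) roots a =
        ((findRoot roots.length roots (roots.getD (pyslot roots.length a) 0)).1.set
            (pyslot (findRoot roots.length roots (roots.getD (pyslot roots.length a) 0)).1.length a)
            (findRoot roots.length roots (roots.getD (pyslot roots.length a) 0)).2,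
          ((findRoot roots.length roots (roots.getD (pyslot roots.length a) 0)).1.set
            (pyslot (findRoot roots.length roots (roots.getD (pyslot roots.length a) 0)).1.length a)
            (findRoot roots.length roots (roots.getD (pyslot roots.length a) 0)).2).getD
            (pyslot ((findRoot roots.length roots (roots.getD (pyslot roots.length a) 0)).1.set
              (pyslot (findRoot roots.length roots (roots.getD (pyslot roots.length a) 0)).1.length a)
              (findRoot roots.length roots (roots.getD (pyslot roots.length a) 0)).2).length a) 0) := by
      simp only [findRoot, if_neg hane]
    by_cases hfix : IsFix roots na
    · have hinner : findRoot roots.length roots (roots.getD (pyslot roots.length a) 0) = (roots, na) := by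
        rw [hstepna, hfix]
        obtain ⟨f, hf⟩ : ∃ f, roots.length = f + 1 := ⟨roots.length - 1, by omega⟩
        rw [hf]
        simp only [findRoot]
        rw [if_pos (by rw [hstepna']; exact hfix.symm)]
      have hnoop : roots.set (pyslot roots.length a) na = roots := by
        have hg : roots.getD na.toNat 0 = na := by
          rw [← pstep_nonneg roots na hva.1]
          exact hfix
        rw [hslot]
        have hi : na.toNat < roots.length := by rcases hva with ⟨u, v⟩; omega
        calc roots.set na.toNat na = roots.set na.toNat (roots.getD na.toNat 0) := by
              rw [hg]
          _ = roots := set_getD_self roots na.toNat hi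
      have hred2 : findRoot (roots.length + 1) roots na = (roots, na) := by
        simp only [findRoot]
        rw [if_pos (by rw [hstepna']; exact hfix.symm)]
      rw [hred1, hinner, hred2]
      simp only [hnoop]
      refine Prod.ext rfl ?_
      show roots.getD (pyslot roots.length a) 0 = na
      rw [hstepna, hfix]
    · have hK : IsFix roots (piter roots (roots.length - 1) (pstep roots na)) := by
        have h' : piter roots roots.length na = piter roots (roots.length - 1) (pstep roots na) := by
          rw [← piter_succ, show roots.length - 1 + 1 = roots.length from by omega]
        rw [← h']
        exact fix_within roots hG na hva
      obtain ⟨_, hplen, _, _, _, _⟩ :=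
        findRoot_spec (roots.length - 1) roots.length roots (pstep roots na) hG
          (hG.1 na hva) hK (by omega)
      have hnfx : ¬ (na = roots.getD (pyslot roots.length na) 0) := by
        rw [hstepna']
        intro hc
        exact hfix hc.symm
      have hred2 : findRoot (roots.length + 1) roots na =
          ((findRoot roots.length roots (roots.getD (pyslot roots.length na) 0)).1.set
              (pyslot (findRoot roots.length roots (roots.getD (pyslot roots.length na) 0)).1.length na)
              (findRoot roots.length roots (roots.getD (pyslot roots.length na) 0)).2,
            ((findRoot roots.length roots (roots.getD (pyslot roots.length na) 0)).1.set
              (pyslot (findRoot roots.length roots (roots.getD (pyslot roots.length na) 0)).1.length na)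
              (findRoot roots.length roots (roots.getD (pyslot roots.length na) 0)).2).getD
              (pyslot ((findRoot roots.length roots (roots.getD (pyslot roots.length na) 0)).1.set
                (pyslot (findRoot roots.length roots (roots.getD (pyslot roots.length na) 0)).1.length na)
                (findRoot roots.length roots (roots.getD (pyslot roots.length na) 0)).2).length na) 0) := by
        simp only [findRoot, if_neg hnfx]
      rw [hred1, hred2, hstepna, hstepna']
      have hsl : ∀ (L : List Int), L.length = roots.length →
          pyslot L.length a = pyslot L.length na := by
        intro L hL
        rw [hL, hslot, pyslot_nonneg _ _ hva.1]
      rw [hsl _ hplen, hsl _ (by rw [List.length_set, hplen])]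


-- Rel transport along a partition-preserving change of roots
theorem rel_cong (roots roots' label : List Int) (hlen : roots'.length = roots.length)
    (hroot : ∀ x, Valid roots x → rootOf roots' x = rootOf roots x)
    (hfix : ∀ r, Valid roots r → (IsFix roots' r ↔ IsFix roots r))
    (h : RelAB roots label) : RelAB roots' label := by
  obtain ⟨h1, h2, h3⟩ := h
  have hV : ∀ x, Valid roots' x ↔ Valid roots x := by
    intro x; unfold Valid; rw [hlen]
  refine ⟨by rw [h1, hlen], ?_, ?_⟩
  · intro a ha
    rw [hV] at ha
    rw [hroot a ha]
    exact h2 a ha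
  · intro r r' hr hr' hf hf' heq
    rw [hV] at hr hr'
    rw [hfix r hr] at hf
    rw [hfix r' hr'] at hf'
    exact h3 r r' hr hr' hf hf' heq

theorem label_eq_iff_root_eq (roots label : List Int) (hG : GoodA roots)
    (h : RelAB roots label) (x y : Int) (hx : Valid roots x) (hy : Valid roots y) :
    (label.getD x.toNat 0 = label.getD y.toNat 0 ↔ rootOf roots x = rootOf roots y) := by
  obtain ⟨h1, h2, h3⟩ := h
  constructor
  · intro heq
    refine h3 (rootOf roots x) (rootOf roots y) (rootOf_valid roots hG x hx)
      (rootOf_valid roots hG y hy) (rootOf_isFix roots hG x hx) (rootOf_isFix roots hG y hy) ?_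
    rw [← h2 x hx, ← h2 y hy]
    exact heq
  · intro heq
    rw [h2 x hx, h2 y hy, heq]

-- Rel is preserved when A merges class s into the class of root r₀ while B
-- replaces label lb by la (one of the two classes' labels, either orientation)
theorem rel_step (roots roots' label : List Int) (s r₀ pu pv : Int)
    (hG : GoodA roots) (hG' : GoodA roots') (hlen : roots'.length = roots.length)
    (hRel : RelAB roots label)
    (hroot : ∀ x, Valid roots x → rootOf roots' x =
        if rootOf roots x = s then r₀ else rootOf roots x)
    (hfix : ∀ r, Valid roots r → (IsFix roots' r ↔ IsFix roots r ∧ r ≠ s))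
    (hs : Valid roots s) (hr₀ : Valid roots r₀) (hFs : IsFix roots s)
    (hFr : IsFix roots r₀) (hne : s ≠ r₀)
    (hpu : Valid roots pu) (hpv : Valid roots pv)
    (hor : (rootOf roots pu = r₀ ∧ rootOf roots pv = s) ∨
           (rootOf roots pu = s ∧ rootOf roots pv = r₀))
    (hlab : label.getD pu.toNat 0 ≠ label.getD pv.toNat 0) :
    RelAB roots' (label.map fun x => if x = label.getD pv.toNat 0 then label.getD pu.toNat 0 else x) := by
  set lb := label.getD pv.toNat 0 with hlbdef
  set la := label.getD pu.toNat 0 with hladef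
  set f := fun x : Int => if x = lb then la else x with hfdef
  obtain ⟨hL1, hL2, hL3⟩ := hRel
  have hV : ∀ x, Valid roots' x ↔ Valid roots x := by
    intro x; unfold Valid; rw [hlen]
  have hmap : ∀ x, Valid roots x → (label.map f).getD x.toNat 0 = f (label.getD x.toNat 0) := by
    intro x hx
    have hi : x.toNat < label.length := by rw [hL1]; rcases hx with ⟨u, v⟩; omega
    simp [List.getD_eq_getElem?_getD, hi]
  have hsame : ∀ x y, Valid roots x → Valid roots y →
      (label.getD x.toNat 0 = label.getD y.toNat 0 ↔ rootOf roots x = rootOf roots y) :=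
    fun x y hx hy => label_eq_iff_root_eq roots label hG ⟨hL1, hL2, hL3⟩ x y hx hy
  have hrs : rootOf roots s = s := rootOf_of_isFix roots s hFs
  have hrr : rootOf roots r₀ = r₀ := rootOf_of_isFix roots r₀ hFr
  refine ⟨by rw [List.length_map, hL1, hlen], ?_, ?_⟩
  · -- label constant on new classes
    intro x hx
    rw [hV] at hx
    rw [hroot x hx, hmap x hx]
    by_cases hxs : rootOf roots x = s
    · rw [if_pos hxs, hmap r₀ hr₀]
      rcases hor with ⟨hpu1, hpv1⟩ | ⟨hpu2, hpv2⟩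
      · -- la is the label of r₀'s class, lb of s's class
        have hxlb : label.getD x.toNat 0 = lb :=
          (hsame x pv hx hpv).2 (by rw [hxs, hpv1])
        have hrla : label.getD r₀.toNat 0 = la :=
          ((hsame pu r₀ hpu hr₀).2 (by rw [hpu1, hrr])).symm
        rw [hxlb, hrla, hfdef]
        simp [hlab]
      · have hxla : label.getD x.toNat 0 = la :=
          ((hsame pu x hpu hx).2 (by rw [hpu2, hxs])).symm
        have hrlb : label.getD r₀.toNat 0 = lb :=
          ((hsame pv r₀ hpv hr₀).2 (by rw [hpv2, hrr])).symm
        rw [hxla, hrlb, hfdef]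
        simp [hlab]
    · rw [if_neg hxs, hmap (rootOf roots x) (rootOf_valid roots hG x hx)]
      rw [hL2 x hx]
  · -- distinct labels on distinct new roots
    intro r r' hr hr' hf hf' heq
    rw [hV] at hr hr'
    rw [hfix r hr] at hf
    rw [hfix r' hr'] at hf'
    obtain ⟨hfr, hrs'⟩ := hf
    obtain ⟨hfr', hrs''⟩ := hf'
    rw [hmap r hr, hmap r' hr'] at heq
    have hself : ∀ z, Valid roots z → IsFix roots z → rootOf roots z = z :=
      fun z _ hz => rootOf_of_isFix roots z hz
    rcases hor with ⟨hpu1, hpv1⟩ | ⟨hpu2, hpv2⟩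
    · -- lb is the label of class s; no surviving root carries it
      have hnr : label.getD r.toNat 0 ≠ lb := by
        intro hc
        have := (hsame r pv hr hpv).1 hc
        rw [hself r hr hfr, hpv1] at this
        exact hrs' this
      have hnr' : label.getD r'.toNat 0 ≠ lb := by
        intro hc
        have := (hsame r' pv hr' hpv).1 hc
        rw [hself r' hr' hfr', hpv1] at this
        exact hrs'' this
      simp only [hfdef] at heq
      simp only [if_neg hnr, if_neg hnr'] at heq
      exact hL3 r r' hr hr' hfr hfr' heq
    · -- lb is the label of class r₀: carried only by r₀ among roots
      have hchar : ∀ z, Valid roots z → IsFix roots z →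
          (label.getD z.toNat 0 = lb ↔ z = r₀) := by
        intro z hz hfz
        constructor
        · intro hc
          have := (hsame z pv hz hpv).1 hc
          rw [hself z hz hfz, hpv2] at this
          exact this
        · intro hc
          subst hc
          exact (hsame z pv hz hpv).2 (by rw [hself z hz hfz, hpv2])
      by_cases h1 : r = r₀
      · by_cases h2 : r' = r₀
        · rw [h1, h2]
        · exfalso
          simp only [hfdef] at heq
          rw [if_pos ((hchar r hr hfr).2 h1),
            if_neg (fun hc => h2 ((hchar r' hr' hfr').1 hc))] at heq
          have := (hsame pu r' hpu hr').1 heq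
          rw [hpu2, hself r' hr' hfr'] at this
          exact hrs'' this.symm
      · by_cases h2 : r' = r₀
        · exfalso
          simp only [hfdef] at heq
          rw [if_neg (fun hc => h1 ((hchar r hr hfr).1 hc)),
            if_pos ((hchar r' hr' hfr').2 h2)] at heq
          have := (hsame pu r hpu hr).1 heq.symm
          rw [hpu2, hself r hr hfr] at this
          exact hrs' this.symm
        · simp only [hfdef] at heq
          rw [if_neg (fun hc => h1 ((hchar r hr hfr).1 hc)),
            if_neg (fun hc => h2 ((hchar r' hr' hfr').1 hc))] at heq
          exact hL3 r r' hr hr' hfr hfr' heq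

-- named copies of the fold bodies of the two ports (definitionally equal to the lambdas)
def aTT (roots : List Int) (b : Int) : List Int :=
  let p := findRoot (roots.length + 1) roots b
  if (0 : Int) = p.2 then p.1
  else ((p.1.set (pyslot p.1.length p.2) 0).set (pyslot p.1.length b) 0)

def aIn (ra a : Int) (roots : List Int) (b : Int) : List Int :=
  let q := findRoot (roots.length + 1) roots b
  let rb := q.2
  if ra = rb then q.1
  else if rb = 0 then ((q.1.set (pyslot q.1.length ra) 0).set (pyslot q.1.length a) 0)
  else ((q.1.set (pyslot q.1.length rb) ra).set (pyslot q.1.length b) ra)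

def aParty (roots : List Int) (guests : List Int) : List Int :=
  if guests.length ≤ 1 then roots
  else
    let a := guests.getD 0 0
    let p := findRoot (roots.length + 1) roots a
    (guests.drop 1).foldl (aIn p.2 a) p.1

theorem aTT_norm (roots : List Int) (b : Int) (hG : GoodA roots)
    (h1 : -(roots.length : Int) ≤ b) (h2 : b < (roots.length : Int)) :
    aTT roots b = aTT roots (normI roots.length b) := by
  unfold aTT
  rw [findRoot_norm roots b hG h1 h2]
  set nb := normI roots.length b with hnb
  have hvb : Valid roots nb := normI_valid roots b h1 h2
  obtain ⟨_, hplen, _, _, _, _⟩ :=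
    findRoot_spec roots.length (roots.length + 1) roots nb hG hvb
      (fix_within roots hG nb hvb) (by omega)
  generalize hpp : findRoot (roots.length + 1) roots nb = P
  rw [hpp] at hplen
  show (if (0:Int) = P.2 then P.1
        else (P.1.set (pyslot P.1.length P.2) 0).set (pyslot P.1.length b) 0)
      = (if (0:Int) = P.2 then P.1
        else (P.1.set (pyslot P.1.length P.2) 0).set (pyslot P.1.length nb) 0)
  have hsl : pyslot P.1.length b = pyslot P.1.length nb := by
    rw [hplen, pyslot_normI, pyslot_normI, hnb, normI_idem roots.length b h1]
  rw [hsl]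

theorem aIn_norm (roots : List Int) (ra a b : Int) (hG : GoodA roots)
    (ha1 : -(roots.length : Int) ≤ a) (ha2 : a < (roots.length : Int))
    (hb1 : -(roots.length : Int) ≤ b) (hb2 : b < (roots.length : Int)) :
    aIn ra a roots b = aIn ra (normI roots.length a) roots (normI roots.length b) := by
  unfold aIn
  rw [findRoot_norm roots b hG hb1 hb2]
  set nb := normI roots.length b with hnb
  set na := normI roots.length a with hna
  have hvb : Valid roots nb := normI_valid roots b hb1 hb2
  obtain ⟨_, hplen, _, _, _, _⟩ :=
    findRoot_spec roots.length (roots.length + 1) roots nb hG hvb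
      (fix_within roots hG nb hvb) (by omega)
  generalize hpp : findRoot (roots.length + 1) roots nb = Q
  rw [hpp] at hplen
  show (if ra = Q.2 then Q.1
        else if Q.2 = 0 then (Q.1.set (pyslot Q.1.length ra) 0).set (pyslot Q.1.length a) 0
        else (Q.1.set (pyslot Q.1.length Q.2) ra).set (pyslot Q.1.length b) ra)
      = (if ra = Q.2 then Q.1
        else if Q.2 = 0 then (Q.1.set (pyslot Q.1.length ra) 0).set (pyslot Q.1.length na) 0
        else (Q.1.set (pyslot Q.1.length Q.2) ra).set (pyslot Q.1.length nb) ra)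
  have hsla : pyslot Q.1.length a = pyslot Q.1.length na := by
    rw [hplen, pyslot_normI, pyslot_normI, hna, normI_idem roots.length a ha1]
  have hslb : pyslot Q.1.length b = pyslot Q.1.length nb := by
    rw [hplen, pyslot_normI, pyslot_normI, hnb, normI_idem roots.length b hb1]
  rw [hsla, hslb]

theorem unionB_norm (label : List Int) (a b : Int)
    (ha : -(label.length : Int) ≤ a) (hb : -(label.length : Int) ≤ b) :
    unionB label a b = unionB label (normI label.length a) (normI label.length b) := by
  unfold unionB
  rw [pyslot_normI label.length a, pyslot_normI label.length b,
    pyslot_normI label.length (normI label.length a),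
    pyslot_normI label.length (normI label.length b),
    normI_idem label.length a ha, normI_idem label.length b hb]

theorem unionB_nonneg (label : List Int) (a b : Int) (ha : 0 ≤ a) (hb : 0 ≤ b) :
    unionB label a b =
      (if label.getD a.toNat 0 = label.getD b.toNat 0 then label
       else label.map (fun x => if x = label.getD b.toNat 0 then label.getD a.toNat 0 else x)) := by
  unfold unionB
  rw [pyslot_nonneg _ _ ha, pyslot_nonneg _ _ hb]

theorem fix_absorb (roots : List Int) (hG : GoodA roots) (b rb : Int)
    (hb : Valid roots b) (hrb : rb = rootOf roots b) :
    ∀ r, (IsFix roots r ∧ r ≠ rb) ∧ r ≠ b ↔ IsFix roots r ∧ r ≠ rb := by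
  intro r
  constructor
  · exact fun h => h.1
  · rintro ⟨h1, h2⟩
    refine ⟨⟨h1, h2⟩, ?_⟩
    intro h
    exact h2 (by rw [hrb, ← h, rootOf_of_isFix roots r h1])

theorem tt_step (n : Nat) (roots label : List Int) (b : Int)
    (hlen : roots.length = n) (hG : GoodA roots) (hRel : RelAB roots label)
    (hb : Valid roots b) :
    (aTT roots b).length = n ∧ GoodA (aTT roots b) ∧ RelAB (aTT roots b) (unionB label 0 b) := by
  have hV0 : Valid roots 0 := ⟨le_refl 0, by rcases hb with ⟨u, v⟩; omega⟩
  obtain ⟨hp2, hplen, hpG, hproot, hpfix, hpstep⟩ :=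
    findRoot_spec roots.length (roots.length + 1) roots b hG hb
      (rootOf_isFix roots hG b hb) (by omega)
  set p := findRoot (roots.length + 1) roots b with hp
  have hvl : ∀ (l : List Int) (x : Int), l.length = roots.length → (Valid l x ↔ Valid roots x) := by
    intro l x h; unfold Valid; rw [h]
  have hrb : p.2 = rootOf roots b := hp2
  have hfixrb : IsFix roots p.2 := hrb ▸ rootOf_isFix roots hG b hb
  have hvrb : Valid roots p.2 := hrb ▸ rootOf_valid roots hG b hb
  have hBu := unionB_nonneg label 0 b (le_refl 0) hb.1
  have hsame := fun x y hx hy => label_eq_iff_root_eq roots label hG hRel x y hx hy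
  by_cases h0 : (0 : Int) = p.2
  · -- b already in the truth class: A only compresses, B skips
    have hred : aTT roots b = p.1 := by
      unfold aTT; rw [← hp, if_pos h0]
    have hBred : unionB label 0 b = label := by
      rw [hBu, if_pos (by
        refine (hsame 0 b hV0 hb).2 ?_
        rw [rootOf_zero roots hG, hrb.symm.trans h0.symm] )]
    rw [hred, hBred]
    exact ⟨hplen.trans hlen, hpG,
      rel_cong roots p.1 label hplen hproot hpfix hRel⟩
  · -- merge b's class into the truth class (root 0)
    have hrbne : p.2 ≠ 0 := fun h => h0 h.symm
    have hbne : b ≠ 0 := by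
      intro h; subst h
      exact h0 ((hrb.trans (rootOf_zero roots hG)).symm)
    have hred : aTT roots b = ((p.1.set (pyslot p.1.length p.2) 0).set (pyslot p.1.length b) 0) := by
      unfold aTT; rw [← hp, if_neg h0]
    have hV1 : ∀ x, Valid roots x → Valid p.1 x := fun x hx => (hvl p.1 x hplen).2 hx
    have hF0 : IsFix p.1 0 := hpG.2.1
    obtain ⟨hG2, hroot2, hfix2⟩ := w_merge p.1 p.2 0 hpG (hV1 _ hvrb) (hV1 _ hV0)
      ((hpfix p.2 hvrb).2 hfixrb) hrbne
      (by rw [rootOf_of_isFix p.1 0 hF0]; exact fun h => hrbne h.symm)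
    set R2 := p.1.set (pyslot p.1.length p.2) 0 with hR2
    have hlen2 : R2.length = roots.length := by rw [hR2, List.length_set, hplen]
    have hV2 : ∀ x, Valid roots x → Valid R2 x := fun x hx => (hvl R2 x hlen2).2 hx
    have hroot20 : rootOf R2 0 = 0 := rootOf_zero R2 hG2
    have hroot2b : rootOf R2 b = 0 := by
      rw [hroot2 b (hV1 _ hb), hproot b hb, if_pos hrb.symm, rootOf_of_isFix p.1 0 hF0]
    obtain ⟨hG3, hroot3, hfix3⟩ := w_compress R2 b 0 hG2 (hV2 _ hb) (hV2 _ hV0) hbne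
      (by rw [hroot2b, hroot20])
      (fun k => by rw [piter_of_fix R2 0 hG2.2.1 k]; exact fun h => hbne h.symm)
    rw [hred, show pyslot p.1.length b = pyslot R2.length b from by rw [hR2, List.length_set]]
    have hlen3 : (R2.set (pyslot R2.length b) 0).length = n := by
      rw [List.length_set, hlen2, hlen]
    refine ⟨hlen3, hG3, ?_⟩
    have hBred : unionB label 0 b =
        label.map (fun x => if x = label.getD b.toNat 0 then label.getD (0:Int).toNat 0 else x) := by
      rw [hBu, if_neg (by
        intro hc
        have := (hsame 0 b hV0 hb).1 hc
        rw [rootOf_zero roots hG] at this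
        exact hrbne (hrb.trans this.symm))]
    rw [hBred]
    refine rel_step roots (R2.set (pyslot R2.length b) 0) label p.2 0 0 b hG hG3
      (by rw [List.length_set, hlen2]) hRel ?_ ?_ hvrb hV0 hfixrb hG.2.1
      hrbne hV0 hb ?_ ?_
    · intro x hx
      rw [hroot3 x (hV2 _ hx), hroot2 x (hV1 _ hx), hproot x hx,
        rootOf_of_isFix p.1 0 hF0]
    · intro r hr
      rw [hfix3 r (hV2 _ hr), hfix2 r (hV1 _ hr), hpfix r hr]
      exact fix_absorb roots hG b p.2 hb hrb r
    · exact Or.inl ⟨rootOf_zero roots hG, hrb.symm⟩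
    · intro hc
      have := (hsame 0 b hV0 hb).1 hc
      rw [rootOf_zero roots hG] at this
      exact hrbne (hrb.trans this.symm)

theorem tt_loop (n : Nat) : ∀ (l roots label : List Int),
    roots.length = n → GoodA roots → RelAB roots label →
    (∀ t ∈ l, -(n : Int) ≤ t ∧ t < (n : Int)) →
    (l.foldl aTT roots).length = n ∧ GoodA (l.foldl aTT roots) ∧
      RelAB (l.foldl aTT roots) (l.foldl (fun lab t => unionB lab 0 t) label) := by
  intro l
  induction l with
  | nil => intro roots label h1 h2 h3 _; exact ⟨h1, h2, h3⟩
  | cons b l ih =>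
    intro roots label h1 h2 h3 h4
    have hb := h4 b (by simp)
    have hbr : -(roots.length : Int) ≤ b ∧ b < (roots.length : Int) := by rw [h1]; exact hb
    have hlab : label.length = roots.length := h3.1
    have hBn : unionB label 0 b = unionB label 0 (normI roots.length b) := by
      rw [unionB_norm label 0 b (by omega) (by rw [hlab]; exact hbr.1),
        normI_of_nonneg _ _ (le_refl 0), hlab]
    simp only [List.foldl_cons]
    rw [aTT_norm roots b h2 hbr.1 hbr.2, hBn]
    obtain ⟨s1, s2, s3⟩ := tt_step n roots label (normI roots.length b) h1 h2 h3
      (normI_valid roots b hbr.1 hbr.2)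
    refine ih _ _ s1 s2 s3 ?_
    intro t ht
    exact h4 t (by simp [ht])

theorem getD_mem_head (g : List Int) (h : g ≠ []) : g.getD 0 0 ∈ g := by
  cases g with
  | nil => exact absurd rfl h
  | cons x xs => simp

theorem in_step (n : Nat) (roots label : List Int) (a ra b : Int)
    (hlen : roots.length = n) (hG : GoodA roots) (hRel : RelAB roots label)
    (ha : Valid roots a) (hrav : Valid roots ra) (hb : Valid roots b)
    (hP1 : rootOf roots ra = rootOf roots a)
    (hP2 : IsFix roots ra ∨ pstep roots ra = 0) :
    (aIn ra a roots b).length = n ∧ GoodA (aIn ra a roots b) ∧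
    RelAB (aIn ra a roots b) (unionB label a b) ∧
    rootOf (aIn ra a roots b) ra = rootOf (aIn ra a roots b) a ∧
    (IsFix (aIn ra a roots b) ra ∨ pstep (aIn ra a roots b) ra = 0) := by
  have hvl : ∀ (l : List Int) (x : Int), l.length = roots.length → (Valid l x ↔ Valid roots x) := by
    intro l x h; unfold Valid; rw [h]
  have hV0 : Valid roots 0 := ⟨le_refl 0, by rcases hb with ⟨u, v⟩; omega⟩
  obtain ⟨hq2, hqlen, hqG, hqroot, hqfix, hqstep⟩ :=
    findRoot_spec roots.length (roots.length + 1) roots b hG hb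
      (rootOf_isFix roots hG b hb) (by omega)
  set q := findRoot (roots.length + 1) roots b with hq
  set rb := q.2 with hrbdef
  have hrb : rb = rootOf roots b := hq2
  have hfixrb : IsFix roots rb := hrb ▸ rootOf_isFix roots hG b hb
  have hvrb : Valid roots rb := hrb ▸ rootOf_valid roots hG b hb
  have hvr₀ : Valid roots (rootOf roots a) := rootOf_valid roots hG a ha
  have hfixr₀ : IsFix roots (rootOf roots a) := rootOf_isFix roots hG a ha
  have hr₀cases : (IsFix roots ra ∧ rootOf roots a = ra) ∨
      (pstep roots ra = 0 ∧ rootOf roots a = 0) := by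
    rcases hP2 with h | h
    · exact Or.inl ⟨h, by rw [← hP1, rootOf_of_isFix roots ra h]⟩
    · refine Or.inr ⟨h, ?_⟩
      rw [← hP1, ← rootOf_pstep roots hG ra hrav, h, rootOf_zero roots hG]
  have hsame := fun x y hx hy => label_eq_iff_root_eq roots label hG hRel x y hx hy
  have hBu := unionB_nonneg label a b ha.1 hb.1
  have hV1 : ∀ x, Valid roots x → Valid q.1 x := fun x hx => (hvl q.1 x hqlen).2 hx
  by_cases h1 : ra = rb
  · -- same class: A only compresses, B skips
    have hred : aIn ra a roots b = q.1 := by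
      unfold aIn; rw [← hq, if_pos h1]
    have hfixra : IsFix roots ra := h1 ▸ hfixrb
    have hr₀ra : rootOf roots a = ra := by
      rw [← hP1, rootOf_of_isFix roots ra hfixra]
    have hBred : unionB label a b = label := by
      rw [hBu, if_pos ((hsame a b ha hb).2 (by rw [hr₀ra, ← hrb, ← h1]))]
    rw [hred, hBred]
    refine ⟨hqlen.trans hlen, hqG, rel_cong roots q.1 label hqlen hqroot hqfix hRel, ?_, ?_⟩
    · rw [hqroot ra hrav, hqroot a ha, hP1]
    · exact Or.inl ((hqfix ra hrav).2 hfixra)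
  · by_cases h2 : rb = 0
    · -- b's class is the truth class: absorb a's class into it
      have hrane : ra ≠ 0 := fun h => h1 (h.trans h2.symm)
      have hred : aIn ra a roots b =
          ((q.1.set (pyslot q.1.length ra) 0).set (pyslot (q.1.set (pyslot q.1.length ra) 0).length a) 0) := by
        unfold aIn; rw [← hq, if_neg h1, if_pos h2,
          show pyslot q.1.length a = pyslot ((q.1.set (pyslot q.1.length ra) 0)).length a from by
            rw [List.length_set]]
      rcases hr₀cases with ⟨hfixra, hr₀ra⟩ | ⟨hpsra, hr₀0⟩
      · -- ra is still a live root: genuine merge of class ra into class 0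
        have hfixra1 : IsFix q.1 ra := (hqfix ra hrav).2 hfixra
        obtain ⟨hG2, hroot2, hfix2⟩ := w_merge q.1 ra 0 hqG (hV1 _ hrav) (hV1 _ hV0)
          hfixra1 hrane
          (by rw [rootOf_of_isFix q.1 0 hqG.2.1]; exact fun h => hrane h.symm)
        set R2 := q.1.set (pyslot q.1.length ra) 0 with hR2
        have hlen2 : R2.length = roots.length := by rw [hR2, List.length_set, hqlen]
        have hV2 : ∀ x, Valid roots x → Valid R2 x := fun x hx => (hvl R2 x hlen2).2 hx
        have hroot2' : ∀ x, Valid roots x →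
            rootOf R2 x = if rootOf roots x = ra then 0 else rootOf roots x := by
          intro x hx
          rw [hroot2 x (hV1 _ hx), hqroot x hx, rootOf_of_isFix q.1 0 hqG.2.1]
        have hfix2' : ∀ r, Valid roots r → (IsFix R2 r ↔ IsFix roots r ∧ r ≠ ra) := by
          intro r hr
          rw [hfix2 r (hV1 _ hr), hqfix r hr]
        have hps2ra : pstep R2 ra = 0 := by
          rw [hR2, pstep_set q.1 ra 0 ra (hV1 _ hrav) (hV1 _ hrav), if_pos rfl]
        have hane : a ≠ 0 := by
          intro h
          apply hrane
          rw [← hr₀ra, h, rootOf_zero roots hG]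
        have hBred : unionB label a b =
            label.map (fun x => if x = label.getD b.toNat 0 then label.getD a.toNat 0 else x) := by
          rw [hBu, if_neg (by
            intro hc
            have := (hsame a b ha hb).1 hc
            rw [hr₀ra, ← hrb] at this
            exact h1 this)]
        by_cases haRa : a = ra
        · have hR3 : R2.set (pyslot R2.length a) 0 = R2 := by
            conv_lhs => rw [hR2]
            rw [show pyslot (q.1.set (pyslot q.1.length ra) 0).length a = pyslot q.1.length ra from by
              rw [List.length_set, haRa], List.set_set, ← hR2]
          rw [hred, hR3, hBred]
          refine ⟨hlen2.trans hlen, hG2, ?_, ?_, ?_⟩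
          · refine rel_step roots R2 label ra 0 a b hG hG2 hlen2 hRel hroot2' hfix2'
              hrav hV0 hfixra hG.2.1 hrane ha hb ?_ ?_
            · exact Or.inr ⟨hr₀ra, hrb.symm.trans h2⟩
            · intro hc
              have := (hsame a b ha hb).1 hc
              rw [hr₀ra, ← hrb] at this
              exact h1 this
          · rw [hroot2' ra hrav, hroot2' a ha, if_pos (rootOf_of_isFix roots ra hfixra),
              if_pos hr₀ra]
          · exact Or.inr hps2ra
        · obtain ⟨hG3, hroot3, hfix3⟩ := w_compress R2 a 0 hG2 (hV2 _ ha) (hV2 _ hV0) hane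
            (by rw [hroot2' a ha, if_pos hr₀ra, rootOf_zero R2 hG2])
            (fun k => by rw [piter_of_fix R2 0 hG2.2.1 k]; exact fun h => hane h.symm)
          rw [hred, hBred]
          have hlen3 : (R2.set (pyslot R2.length a) 0).length = roots.length := by
            rw [List.length_set, hlen2]
          refine ⟨hlen3.trans hlen, hG3, ?_, ?_, ?_⟩
          · refine rel_step roots (R2.set (pyslot R2.length a) 0) label ra 0 a b hG hG3 hlen3 hRel
              ?_ ?_ hrav hV0 hfixra hG.2.1 hrane ha hb ?_ ?_
            · intro x hx
              rw [hroot3 x (hV2 _ hx), hroot2' x hx]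
            · intro r hr
              rw [hfix3 r (hV2 _ hr), hfix2' r hr]
              constructor
              · exact fun h => h.1
              · rintro ⟨hh1, hh2⟩
                refine ⟨⟨hh1, hh2⟩, ?_⟩
                intro hc
                apply haRa
                rw [← rootOf_of_isFix roots a (hc ▸ hh1), hr₀ra]
            · exact Or.inr ⟨hr₀ra, hrb.symm.trans h2⟩
            · intro hc
              have := (hsame a b ha hb).1 hc
              rw [hr₀ra, ← hrb] at this
              exact h1 this
          · rw [hroot3 ra (hV2 _ hrav), hroot3 a (hV2 _ ha), hroot2' ra hrav, hroot2' a ha,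
              if_pos (rootOf_of_isFix roots ra hfixra), if_pos hr₀ra]
          · refine Or.inr ?_
            rw [pstep_set R2 a 0 ra (hV2 _ ha) (hV2 _ hrav), if_neg (fun h => haRa h.symm), hps2ra]
      · -- ra was already absorbed into the truth class: both writes are no-ops on the partition
        have hps1ra : pstep q.1 ra = 0 := by
          rcases hqstep ra hrav with h | h
          · rw [h, hpsra]
          · rw [h, hP1, hr₀0]
        have hR2 : q.1.set (pyslot q.1.length ra) 0 = q.1 := by
          have hsl : pyslot q.1.length ra = ra.toNat := pyslot_nonneg _ _ hrav.1
          have h00 : q.1.getD ra.toNat 0 = 0 := by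
            rw [← hsl]; exact hps1ra
          rw [hsl, ← h00, set_getD_self q.1 ra.toNat (by
            rw [hqlen]; rcases hrav with ⟨u, v⟩; omega)]
        have hroota : rootOf q.1 a = 0 := by
          rw [hqroot a ha, hr₀0]
        have hBred : unionB label a b = label := by
          rw [hBu, if_pos ((hsame a b ha hb).2 (by rw [hr₀0, ← hrb, h2]))]
        rw [hred, hR2, hBred]
        by_cases hane : a = 0
        · have hR3 : q.1.set (pyslot q.1.length a) 0 = q.1 := by
            have hsl : pyslot q.1.length a = a.toNat := pyslot_nonneg _ _ ha.1
            have h00 : q.1.getD a.toNat 0 = 0 := by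
              have hz := hqG.2.1
              unfold pstep at hz
              rw [pyslot_nonneg _ _ (le_refl 0)] at hz
              rw [hane]
              exact hz
            rw [hsl, ← h00, set_getD_self q.1 a.toNat (by
              rw [hqlen]; rcases ha with ⟨u, v⟩; omega)]
          rw [hR3]
          refine ⟨hqlen.trans hlen, hqG, rel_cong roots q.1 label hqlen hqroot hqfix hRel, ?_, ?_⟩
          · rw [hqroot ra hrav, hqroot a ha, hP1]
          · exact Or.inr hps1ra
        · obtain ⟨hG3, hroot3, hfix3⟩ := w_compress q.1 a 0 hqG (hV1 _ ha) (hV1 _ hV0) hane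
            (by rw [hroota, rootOf_zero q.1 hqG])
            (fun k => by rw [piter_of_fix q.1 0 hqG.2.1 k]; exact fun h => hane h.symm)
          have hlen3 : (q.1.set (pyslot q.1.length a) 0).length = roots.length := by
            rw [List.length_set, hqlen]
          refine ⟨hlen3.trans hlen, hG3, ?_, ?_, ?_⟩
          · refine rel_cong roots _ label hlen3 ?_ ?_ hRel
            · intro x hx
              rw [hroot3 x (hV1 _ hx), hqroot x hx]
            · intro r hr
              rw [hfix3 r (hV1 _ hr), hqfix r hr]
              constructor
              · exact fun h => h.1
              · intro h
                refine ⟨h, ?_⟩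
                intro hc
                apply hane
                rw [← rootOf_of_isFix roots a (hc ▸ h), hr₀0]
          · rw [hroot3 ra (hV1 _ hrav), hroot3 a (hV1 _ ha), hqroot ra hrav, hqroot a ha, hP1]
          · refine Or.inr ?_
            rw [pstep_set q.1 a 0 ra (hV1 _ ha) (hV1 _ hrav)]
            split
            · rfl
            · exact hps1ra
    · -- general merge: attach b's class under ra (whose class is rootOf roots a)
      have hbne : b ≠ 0 := by
        intro h; subst h
        exact h2 (hrb.trans (rootOf_zero roots hG))
      have hroot1ra : rootOf q.1 ra = rootOf roots a := by rw [hqroot ra hrav, hP1]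
      have hr₀rb : rootOf roots a ≠ rb := by
        rcases hr₀cases with ⟨_, h⟩ | ⟨_, h⟩
        · rw [h]; exact h1
        · rw [h]; exact fun hc => h2 hc.symm
      obtain ⟨hG2, hroot2, hfix2⟩ := w_merge q.1 rb ra hqG (hV1 _ hvrb) (hV1 _ hrav)
        ((hqfix rb hvrb).2 hfixrb) h2 (by rw [hroot1ra]; exact hr₀rb)
      set R2 := q.1.set (pyslot q.1.length rb) ra with hR2
      have hlen2 : R2.length = roots.length := by rw [hR2, List.length_set, hqlen]
      have hV2 : ∀ x, Valid roots x → Valid R2 x := fun x hx => (hvl R2 x hlen2).2 hx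
      have hroot2' : ∀ x, Valid roots x →
          rootOf R2 x = if rootOf roots x = rb then rootOf roots a else rootOf roots x := by
        intro x hx
        rw [hroot2 x (hV1 _ hx), hqroot x hx, hroot1ra]
      have hfix2' : ∀ r, Valid roots r → (IsFix R2 r ↔ IsFix roots r ∧ r ≠ rb) := by
        intro r hr
        rw [hfix2 r (hV1 _ hr), hqfix r hr]
      have hred : aIn ra a roots b = (R2.set (pyslot R2.length b) ra) := by
        unfold aIn; rw [← hq, if_neg h1, if_neg h2,
          show pyslot q.1.length b = pyslot R2.length b from by rw [hR2, List.length_set]]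
      have hBred : unionB label a b =
          label.map (fun x => if x = label.getD b.toNat 0 then label.getD a.toNat 0 else x) := by
        rw [hBu, if_neg (by
          intro hc
          have := (hsame a b ha hb).1 hc
          rw [← hrb] at this
          exact hr₀rb this)]
      have hbra : b ≠ ra := by
        intro hc
        apply hr₀rb
        rw [← hP1, ← hc, hrb]
      have havoid1 : ∀ j, piter q.1 j ra ≠ rb := by
        intro j hc
        have := rootOf_piter q.1 hqG ra (hV1 _ hrav) j
        rw [hc, rootOf_of_isFix q.1 rb ((hqfix rb hvrb).2 hfixrb), hroot1ra] at this
        exact hr₀rb this.symm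
      have hchain : ∀ k, piter R2 k ra ≠ b := by
        intro k
        rw [hR2, piter_set_avoid q.1 rb ra hqG (hV1 _ hvrb) k ra (hV1 _ hrav) havoid1]
        intro hc
        have := rootOf_piter q.1 hqG ra (hV1 _ hrav) k
        rw [hc, hqroot b hb, hroot1ra, ← hrb] at this
        exact hr₀rb this.symm
      have hps2ra : pstep R2 ra = pstep q.1 ra := by
        rw [hR2, pstep_set q.1 rb ra ra (hV1 _ hvrb) (hV1 _ hrav), if_neg h1]
      obtain ⟨hG3, hroot3, hfix3⟩ := w_compress R2 b ra hG2 (hV2 _ hb) (hV2 _ hrav) hbne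
        (by
          rw [hroot2' b hb, if_pos hrb.symm, hroot2' ra hrav, if_neg (by rw [hP1]; exact hr₀rb)]
          exact hP1.symm)
        hchain
      rw [hred, hBred]
      have hlen3 : (R2.set (pyslot R2.length b) ra).length = roots.length := by
        rw [List.length_set, hlen2]
      refine ⟨hlen3.trans hlen, hG3, ?_, ?_, ?_⟩
      · refine rel_step roots (R2.set (pyslot R2.length b) ra) label rb (rootOf roots a) a b
          hG hG3 hlen3 hRel ?_ ?_ hvrb hvr₀ hfixrb hfixr₀ (fun h => hr₀rb h.symm) ha hb ?_ ?_
        · intro x hx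
          rw [hroot3 x (hV2 _ hx), hroot2' x hx]
        · intro r hr
          rw [hfix3 r (hV2 _ hr), hfix2' r hr]
          exact fix_absorb roots hG b rb hb hrb r
        · exact Or.inl ⟨rfl, hrb.symm⟩
        · intro hc
          have := (hsame a b ha hb).1 hc
          rw [← hrb] at this
          exact hr₀rb this
      · rw [hroot3 ra (hV2 _ hrav), hroot3 a (hV2 _ ha), hroot2' ra hrav, hroot2' a ha,
          if_neg (by rw [hP1]; exact hr₀rb), if_neg hr₀rb, hP1]
      · rcases hr₀cases with ⟨hfixra, _⟩ | ⟨hpsra, _⟩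
        · refine Or.inl ?_
          rw [hfix3 ra (hV2 _ hrav), hfix2' ra hrav]
          exact ⟨⟨hfixra, h1⟩, fun h => hbra h.symm⟩
        · refine Or.inr ?_
          have hq0 : pstep q.1 ra = 0 := by
            rcases hqstep ra hrav with h | h
            · rw [h, hpsra]
            · rw [h, hP1, ← hP1, ← rootOf_pstep roots hG ra hrav, hpsra, rootOf_zero roots hG]
          rw [pstep_set R2 b ra ra (hV2 _ hb) (hV2 _ hrav), if_neg (fun h => hbra h.symm), hps2ra, hq0]

theorem in_loop (n : Nat) : ∀ (rest : List Int) (roots label : List Int) (a ra : Int),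
    roots.length = n → GoodA roots → RelAB roots label →
    (-(n : Int) ≤ a ∧ a < (n : Int)) → Valid roots ra →
    (∀ b ∈ rest, -(n : Int) ≤ b ∧ b < (n : Int)) →
    rootOf roots ra = rootOf roots (normI n a) → (IsFix roots ra ∨ pstep roots ra = 0) →
    (rest.foldl (aIn ra a) roots).length = n ∧ GoodA (rest.foldl (aIn ra a) roots) ∧
      RelAB (rest.foldl (aIn ra a) roots) (rest.foldl (fun lab b => unionB lab a b) label) := by
  intro rest
  induction rest with
  | nil => intro roots label a ra h1 h2 h3 _ _ _ _ _; exact ⟨h1, h2, h3⟩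
  | cons b rest ih =>
    intro roots label a ra h1 h2 h3 ha hra hmem hP1 hP2
    have hb := hmem b (by simp)
    have hbr : -(roots.length : Int) ≤ b ∧ b < (roots.length : Int) := by rw [h1]; exact hb
    have har : -(roots.length : Int) ≤ a ∧ a < (roots.length : Int) := by rw [h1]; exact ha
    have hlab : label.length = roots.length := h3.1
    have hBn : unionB label a b =
        unionB label (normI roots.length a) (normI roots.length b) := by
      rw [unionB_norm label a b (by rw [hlab]; exact har.1) (by rw [hlab]; exact hbr.1), hlab]
    simp only [List.foldl_cons]
    rw [aIn_norm roots ra a b h2 har.1 har.2 hbr.1 hbr.2, hBn]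
    have hnaeq : normI roots.length a = normI n a := by rw [h1]
    obtain ⟨s1, s2, s3, s4, s5⟩ := in_step n roots label (normI roots.length a) ra
      (normI roots.length b) h1 h2 h3
      (normI_valid roots a har.1 har.2) hra (normI_valid roots b hbr.1 hbr.2)
      (by rw [hnaeq]; exact hP1) hP2
    refine ih _ _ a ra s1 s2 s3 ha ?_ (fun x hx => hmem x (by simp [hx])) ?_ ?_
    · unfold Valid at *
      rw [s1, ← h1]
      exact hra
    · rw [← hnaeq]
      exact s4
    · exact s5

theorem party_step (n : Nat) (roots label : List Int) (g : List Int)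
    (h1 : roots.length = n) (h2 : GoodA roots) (h3 : RelAB roots label)
    (hmem : ∀ m ∈ g, -(n : Int) ≤ m ∧ m < (n : Int)) (hne : g ≠ []) :
    (aParty roots g).length = n ∧ GoodA (aParty roots g) ∧
      RelAB (aParty roots g)
        ((g.drop 1).foldl (fun lab b => unionB lab (g.getD 0 0) b) label) := by
  by_cases hlen1 : g.length ≤ 1
  · have hdrop : g.drop 1 = [] := by
      cases g with
      | nil => rfl
      | cons x xs =>
        simp at hlen1
        simp [hlen1]
    have hred : aParty roots g = roots := by unfold aParty; rw [if_pos hlen1]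
    rw [hred, hdrop]
    exact ⟨h1, h2, h3⟩
  · have hab := hmem _ (getD_mem_head g hne)
    have habr : -(roots.length : Int) ≤ g.getD 0 0 ∧ g.getD 0 0 < (roots.length : Int) := by
      rw [h1]; exact hab
    have hva : Valid roots (normI roots.length (g.getD 0 0)) :=
      normI_valid roots _ habr.1 habr.2
    have hred : aParty roots g = (g.drop 1).foldl
        (aIn (findRoot (roots.length + 1) roots (g.getD 0 0)).2 (g.getD 0 0))
        (findRoot (roots.length + 1) roots (g.getD 0 0)).1 := by
      unfold aParty; rw [if_neg hlen1]
    rw [hred, findRoot_norm roots (g.getD 0 0) h2 habr.1 habr.2]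
    set na := normI roots.length (g.getD 0 0) with hna
    obtain ⟨hp2, hplen, hpG, hproot, hpfix, hpstep⟩ :=
      findRoot_spec roots.length (roots.length + 1) roots na h2 hva
        (rootOf_isFix roots h2 _ hva) (by omega)
    set p := findRoot (roots.length + 1) roots na with hp
    have hvl : ∀ x, Valid p.1 x ↔ Valid roots x := by
      intro x; unfold Valid; rw [hplen]
    have hvp2 : Valid roots p.2 := hp2 ▸ rootOf_valid roots h2 _ hva
    have hnaeq : normI n (g.getD 0 0) = na := by rw [hna, h1]
    refine in_loop n (g.drop 1) p.1 label (g.getD 0 0) p.2 (hplen.trans h1) hpG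
      (rel_cong roots p.1 label hplen hproot hpfix h3)
      (by rw [← h1]; exact habr) ((hvl _).2 hvp2) ?_ ?_ ?_
    · intro b hbmem
      exact hmem b (List.mem_of_mem_drop hbmem)
    · rw [hnaeq, hproot _ ((hvl _).1 ((hvl _).2 hvp2)), hproot _ hva, hp2,
        rootOf_of_isFix roots _ (hp2 ▸ rootOf_isFix roots h2 _ hva)]
    · exact Or.inl ((hpfix _ hvp2).2 (hp2 ▸ rootOf_isFix roots h2 _ hva))

theorem party_loop (n : Nat) : ∀ (ps : List (List Int)) (roots label : List Int),
    roots.length = n → GoodA roots → RelAB roots label →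
    (∀ g ∈ ps, g ≠ [] ∧ ∀ m ∈ g, -(n : Int) ≤ m ∧ m < (n : Int)) →
    (ps.foldl aParty roots).length = n ∧ GoodA (ps.foldl aParty roots) ∧
      RelAB (ps.foldl aParty roots)
        (ps.foldl (fun lab g => (g.drop 1).foldl (fun lab b => unionB lab (g.getD 0 0) b) lab) label) := by
  intro ps
  induction ps with
  | nil => intro roots label h1 h2 h3 _; exact ⟨h1, h2, h3⟩
  | cons g ps ih =>
    intro roots label h1 h2 h3 h4
    obtain ⟨s1, s2, s3⟩ := party_step n roots label g h1 h2 h3 (h4 g (by simp)).2 (h4 g (by simp)).1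
    simp only [List.foldl_cons]
    exact ih _ _ s1 s2 s3 (fun g' hg' => h4 g' (by simp [hg']))

-- the final counting pass: A's list of booleans records, per party, whether the
-- first guest's root is positive; compression inside it never changes roots
theorem final_loop (n : Nat) : ∀ (ps : List (List Int)) (roots : List Int) (acc : List Bool),
    roots.length = n → GoodA roots →
    (∀ g ∈ ps, g ≠ [] ∧ ∀ m ∈ g, -(n : Int) ≤ m ∧ m < (n : Int)) →
    (ps.foldl (fun (st : List Int × List Bool) g =>
        let p := findRoot (st.1.length + 1) st.1 (g.getD 0 0)
        (p.1, st.2 ++ [decide (p.2 > 0)])) (roots, acc)).2 =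
      acc ++ ps.map (fun g => decide (rootOf roots (normI n (g.getD 0 0)) > 0)) := by
  intro ps
  induction ps with
  | nil => intro roots acc h1 h2 h3; simp
  | cons g ps ih =>
    intro roots acc h1 h2 h3
    have hab := (h3 g (by simp)).2 _ (getD_mem_head g (h3 g (by simp)).1)
    have habr : -(roots.length : Int) ≤ g.getD 0 0 ∧ g.getD 0 0 < (roots.length : Int) := by
      rw [h1]; exact hab
    have hva : Valid roots (normI roots.length (g.getD 0 0)) :=
      normI_valid roots _ habr.1 habr.2
    obtain ⟨hp2, hplen, hpG, hproot, hpfix, hpstep⟩ :=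
      findRoot_spec roots.length (roots.length + 1) roots (normI roots.length (g.getD 0 0))
        h2 hva (rootOf_isFix roots h2 _ hva) (by omega)
    simp only [List.foldl_cons]
    rw [findRoot_norm roots (g.getD 0 0) h2 habr.1 habr.2]
    rw [ih (findRoot (roots.length + 1) roots (normI roots.length (g.getD 0 0))).1 _
      (hplen.trans h1) hpG (fun g' hg' => h3 g' (by simp [hg']))]
    rw [hp2]
    have hmapeq : ps.map (fun g' => decide
          (rootOf (findRoot (roots.length + 1) roots (normI roots.length (g.getD 0 0))).1
            (normI n (g'.getD 0 0)) > 0)) =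
        ps.map (fun g' => decide (rootOf roots (normI n (g'.getD 0 0)) > 0)) := by
      apply List.map_congr_left
      intro g' hg'
      have hab' := (h3 g' (by simp [hg'])).2 _ (getD_mem_head g' (h3 g' (by simp [hg'])).1)
      have ha' : Valid roots (normI n (g'.getD 0 0)) := by
        rw [← h1] at hab' ⊢
        exact normI_valid roots _ hab'.1 hab'.2
      rw [hproot _ ha']
    rw [hmapeq]
    have hnaeq : normI roots.length (g.getD 0 0) = normI n (g.getD 0 0) := by rw [h1]
    rw [hnaeq]
    simp

-- B's final pass counts the parties whose first guest's label differs from label[0]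
theorem bcount_loop : ∀ (ps : List (List Int)) (label : List Int) (c : Int),
    ps.foldl (fun (c : Int) g =>
      if label.getD (pyslot label.length (g.getD 0 0)) 0 = label.getD (pyslot label.length 0) 0
      then c else c + 1) c =
    c + ((ps.map (fun g => decide ¬(label.getD (pyslot label.length (g.getD 0 0)) 0 =
          label.getD (pyslot label.length 0) 0))).count true : Int) := by
  intro ps
  induction ps with
  | nil => intro label c; simp
  | cons g ps ih =>
    intro label c
    simp only [List.foldl_cons, List.map_cons]
    rw [ih]
    by_cases h : label.getD (pyslot label.length (g.getD 0 0)) 0 = label.getD (pyslot label.length 0) 0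
    · rw [if_pos h]
      have hd : (decide ¬(label.getD (pyslot label.length (g.getD 0 0)) 0 =
          label.getD (pyslot label.length 0) 0)) = false := by
        rw [decide_eq_false_iff_not]
        exact not_not_intro h
      rw [List.count_cons, hd]
      simp
    · rw [if_neg h]
      have hd : (decide ¬(label.getD (pyslot label.length (g.getD 0 0)) 0 =
          label.getD (pyslot label.length 0) 0)) = true := by
        simp only [decide_eq_true_eq]
        exact h
      rw [List.count_cons, hd]
      simp
      ring

-- the identity array is a good start for both programs
theorem init_good (m : Nat) :
    ((List.range m).map Int.ofNat).length = m ∧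
    GoodA ((List.range m).map Int.ofNat) ∧
    RelAB ((List.range m).map Int.ofNat) ((List.range m).map Int.ofNat) := by
  set L := (List.range m).map Int.ofNat with hL
  have hlen : L.length = m := by rw [hL]; simp
  have hget : ∀ x : Int, 0 ≤ x → x < (m : Int) → L.getD x.toNat 0 = x := by
    intro x h1 h2
    rw [hL]
    have hx : x.toNat < m := by omega
    rw [List.getD_eq_getElem _ 0 (by simpa using hx)]
    rw [List.getElem_map, List.getElem_range, Int.ofNat_eq_natCast]
    omega
  have hstep : ∀ x : Int, Valid L x → pstep L x = x := by
    intro x hx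
    rcases hx with ⟨h1, h2⟩
    rw [hlen] at h2
    rw [pstep_nonneg L x h1]
    exact hget x h1 h2
  have hfix : ∀ x : Int, Valid L x → IsFix L x := hstep
  have hroot : ∀ x : Int, Valid L x → rootOf L x = x :=
    fun x hx => rootOf_of_isFix L x (hfix x hx)
  have hG : GoodA L := by
    refine ⟨?_, ?_, ?_⟩
    · intro x hx
      rw [hstep x hx]; exact hx
    · by_cases hm : m = 0
      · subst hm
        unfold pstep
        have : L = [] := by rw [hL]; simp
        rw [this]; rfl
      · exact hstep 0 ⟨le_refl 0, by rw [hlen]; omega⟩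
    · intro x hx
      exact ⟨0, hfix x hx⟩
  refine ⟨hlen, hG, rfl, ?_, ?_⟩
  · intro x hx
    rw [hroot x hx]
  · intro r r' hr hr' _ _ heq
    rcases hr with ⟨u1, u2⟩
    rcases hr' with ⟨v1, v2⟩
    rw [hlen] at u2 v2
    rw [hget r u1 u2, hget r' v1 v2] at heq
    exact heq

theorem solve_main (N : Int) (tt : List Int) (parties : List (List Int))
    (hPre : Pre_solve N tt parties) : solve N tt parties = solve_alt N tt parties := by
  obtain ⟨hPt, hPp⟩ := hPre
  rcases lt_or_ge N 0 with hN | hN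
  · -- degenerate: no persons exist, so tt and parties are empty
    have htt : tt = [] := by
      cases tt with
      | nil => rfl
      | cons t ts =>
        have := hPt t (by simp)
        omega
    have hpp : parties = [] := by
      cases parties with
      | nil => rfl
      | cons g gs =>
        obtain ⟨hne, hm⟩ := hPp g (by simp)
        have := hm _ (getD_mem_head g hne)
        omega
    subst htt; subst hpp
    rfl
  · set m := (N+1).toNat with hm
    have hmc : (m : Int) = N + 1 := by omega
    obtain ⟨hi1, hi2, hi3⟩ := init_good m
    set L0 := (List.range m).map Int.ofNat with hL0
    -- A unfolded through the named step functions
    have hA : solve N tt parties =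
        ((parties.foldl (fun (st : List Int × List Bool) g =>
            let p := findRoot (st.1.length + 1) st.1 (g.getD 0 0)
            (p.1, st.2 ++ [decide (p.2 > 0)]))
          (parties.foldl aParty (tt.foldl aTT L0), ([] : List Bool))).2.count true : Int) := rfl
    have hB : solve_alt N tt parties =
        (parties.foldl (fun (c : Int) g =>
          if (parties.foldl (fun lab g =>
                (g.drop 1).foldl (fun lab b => unionB lab (g.getD 0 0) b) lab)
              (tt.foldl (fun lab t => unionB lab 0 t) L0)).getD
              (pyslot (parties.foldl (fun lab g =>
                (g.drop 1).foldl (fun lab b => unionB lab (g.getD 0 0) b) lab)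
              (tt.foldl (fun lab t => unionB lab 0 t) L0)).length (g.getD 0 0)) 0 =
            (parties.foldl (fun lab g =>
                (g.drop 1).foldl (fun lab b => unionB lab (g.getD 0 0) b) lab)
              (tt.foldl (fun lab t => unionB lab 0 t) L0)).getD
              (pyslot (parties.foldl (fun lab g =>
                (g.drop 1).foldl (fun lab b => unionB lab (g.getD 0 0) b) lab)
              (tt.foldl (fun lab t => unionB lab 0 t) L0)).length 0) 0
          then c else c + 1) 0) := rfl
    obtain ⟨ht1, ht2, ht3⟩ := tt_loop m tt L0 L0 hi1 hi2 hi3 (by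
      intro t htm
      have := hPt t htm
      omega)
    obtain ⟨hp1, hp2, hp3⟩ := party_loop m parties (tt.foldl aTT L0)
      (tt.foldl (fun lab t => unionB lab 0 t) L0) ht1 ht2 ht3 (by
        intro g hg
        obtain ⟨hne, hmm⟩ := hPp g hg
        refine ⟨hne, ?_⟩
        intro x hx
        have := hmm x hx
        omega)
    set R2 := parties.foldl aParty (tt.foldl aTT L0) with hR2
    set LB := parties.foldl (fun lab g =>
        (g.drop 1).foldl (fun lab b => unionB lab (g.getD 0 0) b) lab)
      (tt.foldl (fun lab t => unionB lab 0 t) L0) with hLB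
    have hmem : ∀ g ∈ parties, g ≠ [] ∧ ∀ x ∈ g, -(m : Int) ≤ x ∧ x < (m : Int) := by
      intro g hg
      obtain ⟨hne, hmm⟩ := hPp g hg
      exact ⟨hne, fun x hx => by have := hmm x hx; omega⟩
    rw [hA, final_loop m parties R2 [] hp1 hp2 hmem, hB, bcount_loop parties LB 0]
    simp only [List.nil_append, zero_add]
    congr 1
    congr 1
    apply List.map_congr_left
    intro g hg
    have hbnd := (hmem g hg).2 _ (getD_mem_head g (hmem g hg).1)
    have hg0 : Valid R2 (normI m (g.getD 0 0)) := by
      have h' : -(R2.length : Int) ≤ g.getD 0 0 ∧ g.getD 0 0 < (R2.length : Int) := by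
        rw [hp1]; exact hbnd
      have := normI_valid R2 (g.getD 0 0) h'.1 h'.2
      rw [hp1] at this
      exact this
    have hV0 : Valid R2 0 := ⟨le_refl 0, by rcases hg0 with ⟨u, v⟩; omega⟩
    have hLBlen : LB.length = R2.length := hp3.1
    have hsl1 : pyslot LB.length (g.getD 0 0) = (normI m (g.getD 0 0)).toNat := by
      rw [pyslot_normI, hLBlen, hp1]
    have hsl0 : pyslot LB.length 0 = (0 : Int).toNat := pyslot_nonneg _ _ (le_refl 0)
    have hg0' : Valid R2 (normI m (g.getD 0 0)) := hg0
    have hiff := label_eq_iff_root_eq R2 LB hp2 hp3 (normI m (g.getD 0 0)) 0 hg0 hV0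
    have hroot0 : rootOf R2 0 = 0 := rootOf_zero R2 hp2
    have hnn : 0 ≤ rootOf R2 (normI m (g.getD 0 0)) := (rootOf_valid R2 hp2 _ hg0).1
    rw [hsl1, hsl0, decide_eq_decide]
    constructor
    · intro hgt hc
      have hz := hiff.1 hc
      rw [hroot0] at hz
      omega
    · intro hne
      have hz : rootOf R2 (normI m (g.getD 0 0)) ≠ 0 :=
        fun hz => hne (hiff.2 (by rw [hz, hroot0]))
      omega

-- ===== VERDICT (by name: the statement is the Claim_ definition above) =====
theorem solve_spec : Claim_equal_solve := by
  intro N tt parties _ hPre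
  unfold Spec_solve
  exact solve_main N tt parties hPre
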